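-- pv_equiv track=rewrite | github.com/Naram-m/SafeDrive | lm.py | get_ancestors_list
-- ===== SOURCE A (Python) =====
-- def get_ancestors_list(B):
--     tokens=B.split('/')
--     prev=''
--     i=0
--     list_of_ancestors_fullpaths=[]
--     for item in tokens:
--         list_of_ancestors_fullpaths.append(prev+'/'+item)
--         if i==0:
--             prev=prev+item
--         else:
--             prev=prev+'/'+item
--         i+=1
--     return list_of_ancestors_fullpaths
-- ===== SOURCE B (Python) =====
-- def get_ancestors_list(B):
--     tokens = B.split('/')
--     return [('/' if k == 0 else '') + '/'.join(tokens[:k + 1])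
--             for k in range(len(tokens))]
-- ===== Notes on version B (the rewrite author's own statement) =====
-- stated objective: alternative
-- what changed: B drops the threaded running-accumulator string and counter of A and instead computes each ancestor path independently by slicing and joining the first k+1 tokens, reproducing the leading-slash-only-on-the-first-element behaviour.
import Mathlib
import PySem

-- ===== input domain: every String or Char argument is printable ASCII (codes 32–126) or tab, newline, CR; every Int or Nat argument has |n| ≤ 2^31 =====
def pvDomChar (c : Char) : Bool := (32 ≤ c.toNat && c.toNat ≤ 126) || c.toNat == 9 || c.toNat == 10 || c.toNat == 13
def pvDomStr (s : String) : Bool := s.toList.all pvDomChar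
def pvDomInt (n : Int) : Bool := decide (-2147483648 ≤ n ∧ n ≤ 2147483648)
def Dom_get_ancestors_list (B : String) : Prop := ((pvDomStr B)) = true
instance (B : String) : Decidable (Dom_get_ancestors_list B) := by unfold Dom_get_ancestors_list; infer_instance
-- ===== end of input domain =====

-- B replaces A's threaded 'prev' accumulator by computing each ancestor path
-- independently as a join of the token prefix (objective: alternative decomposition).

-- ===== PORT A =====
-- A's loop over tokens, threading (prev, i, acc); strings handled as List Char
-- (exact: PySem.Chars.splitOn is Python's str.split with a nonempty separator,
-- and List Char append is Python string concatenation).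
def get_ancestors_list (B : String) : List String :=
  let tokens := PySem.Chars.splitOn B.toList ['/']
  let st := tokens.foldl
    (fun (st : List Char × Int × List (List Char)) item =>
      let acc := st.2.2 ++ [st.1 ++ ['/'] ++ item]
      let prev := if st.2.1 == 0 then st.1 ++ item else st.1 ++ ['/'] ++ item
      (prev, st.2.1 + 1, acc))
    ([], 0, [])
  st.2.2.map String.mk

-- ===== PORT B =====
-- B's comprehension: path k is ('/' if k == 0 else '') + '/'.join(tokens[:k+1]).
def get_ancestors_list_alt (B : String) : List String :=
  let tokens := PySem.Chars.splitOn B.toList ['/']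
  ((List.range tokens.length).map (fun k =>
      (if k == 0 then ['/'] else []) ++ PySem.Chars.join ['/'] (tokens.take (k + 1)))).map
    String.mk

-- ===== PRECONDITION & SPEC =====
def Spec_get_ancestors_list (B : String) (out : List String) : Prop := out = get_ancestors_list_alt B
instance (B : String) (out : List String) : Decidable (Spec_get_ancestors_list B out) := by unfold Spec_get_ancestors_list; infer_instance

-- ===== CLAIM (what is proved, stated in full; the proofs are below) =====
def Claim_equal_get_ancestors_list : Prop := ∀ (B : String), Dom_get_ancestors_list B → Spec_get_ancestors_list B (get_ancestors_list B)

-- ===== LEMMAS AND PROOFS =====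

-- A's loop body, as a named function.
def pvStepA (st : List Char × Int × List (List Char)) (item : List Char) :
    List Char × Int × List (List Char) :=
  let acc := st.2.2 ++ [st.1 ++ ['/'] ++ item]
  let prev := if st.2.1 == 0 then st.1 ++ item else st.1 ++ ['/'] ++ item
  (prev, st.2.1 + 1, acc)

-- What A's loop produces after the first token: each step appends prev ++ '/' ++ item
-- and extends prev the same way.
def pvTail (prev : List Char) : List (List Char) → List (List Char)
  | [] => []
  | t :: ts => (prev ++ ['/'] ++ t) :: pvTail (prev ++ ['/'] ++ t) ts

theorem pvFoldA_tail (ts : List (List Char)) :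
    ∀ (prev : List Char) (i : Int) (acc : List (List Char)), 0 < i →
      (ts.foldl pvStepA (prev, i, acc)).2.2 = acc ++ pvTail prev ts := by
  induction ts with
  | nil => intro prev i acc _; simp [pvTail]
  | cons t ts ih =>
      intro prev i acc hi
      have hne : (i == 0) = false := by
        rw [beq_eq_false_iff_ne]; omega
      simp only [List.foldl_cons, pvStepA, hne, Bool.false_eq_true, if_false, pvTail]
      rw [ih (prev ++ ['/'] ++ t) (i + 1) (acc ++ [prev ++ ['/'] ++ t]) (by omega)]
      simp

-- '/'.join(t :: p) with p a NONEMPTY taken prefix splits off its head.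
theorem pvJoin_cons_take (t : List Char) (ts : List (List Char)) (k : Nat)
    (h : k < ts.length) :
    PySem.Chars.join ['/'] (t :: ts.take (k + 1))
      = t ++ ['/'] ++ PySem.Chars.join ['/'] (ts.take (k + 1)) := by
  cases ts with
  | nil => simp at h
  | cons a l => simp only [List.take_succ_cons, PySem.Chars.join_cons_cons]

theorem pvTail_eq_join (ts : List (List Char)) :
    ∀ (prev : List Char),
      pvTail prev ts
        = (List.range ts.length).map
            (fun k => prev ++ ['/'] ++ PySem.Chars.join ['/'] (ts.take (k + 1))) := by
  induction ts with
  | nil => intro prev; simp [pvTail]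
  | cons t ts ih =>
      intro prev
      simp only [pvTail, List.length_cons, List.range_succ_eq_map, List.map_cons, List.map_map]
      congr 1
      · simp [PySem.Chars.join, List.intercalate]
      · rw [ih (prev ++ ['/'] ++ t)]
        apply List.map_congr_left
        intro k hk
        have hk' : k < ts.length := List.mem_range.mp hk
        simp only [Function.comp, List.take_succ_cons, pvJoin_cons_take t ts k hk',
          List.append_assoc]

theorem get_ancestors_list_eq_alt (B : String) :
    get_ancestors_list B = get_ancestors_list_alt B := by
  unfold get_ancestors_list get_ancestors_list_alt
  cases hts : PySem.Chars.splitOn B.toList ['/'] with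
  | nil => simp
  | cons t ts =>
      simp only []
      congr 1
      -- first loop iteration: prev = t, i = 1, acc = [['/'] ++ t]
      have h1 : (List.foldl (fun (st : List Char × Int × List (List Char)) item =>
          let acc := st.2.2 ++ [st.1 ++ ['/'] ++ item]
          let prev := if st.2.1 == 0 then st.1 ++ item else st.1 ++ ['/'] ++ item
          (prev, st.2.1 + 1, acc)) ([], 0, []) (t :: ts)).2.2
          = [['/'] ++ t] ++ pvTail t ts := by
        show (List.foldl pvStepA ([], 0, []) (t :: ts)).2.2 = _
        simp only [List.foldl_cons]
        have : pvStepA ([], 0, []) t = (t, 1, [['/'] ++ t]) := by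
          simp [pvStepA]
        rw [this, pvFoldA_tail ts t 1 [['/'] ++ t] (by omega)]
      rw [h1, pvTail_eq_join]
      simp only [List.length_cons, List.range_succ_eq_map, List.map_cons, List.map_map,
        List.cons_append, List.nil_append]
      congr 1
      · simp [PySem.Chars.join, List.intercalate]
      · apply List.map_congr_left
        intro k hk
        have hk' : k < ts.length := List.mem_range.mp hk
        simp [Function.comp, pvJoin_cons_take t ts k hk']

-- ===== VERDICT (by name: the statement is the Claim_ definition above) =====
theorem get_ancestors_list_spec : Claim_equal_get_ancestors_list := by
  intro B _
  exact get_ancestors_list_eq_alt B
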